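-- pv_equiv track=rewrite | github.com/kybersutr/AoC2023 | 14/14.py | shuffle_left_row
-- ===== SOURCE A (Python) =====
-- def shuffle_left_row(row):
--     fall_index = 0
--     for i in range(len(row)):
--         if row[i] == '#':
--             fall_index = i+1
--         elif row[i] == 'O':
--             row[i] = '.'
--             row[fall_index] = 'O'
--             fall_index += 1
--
--     return row
-- ===== SOURCE B (Python) =====
-- def _pack(seg):
--     k = seg.count('O')
--     return ['O'] * k + [('.' if c == 'O' else c) for c in seg[k:]]
--
--
-- def shuffle_left_row(row):
--     # Builds a new list (A mutates its argument in place; return values agree).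
--     out = []
--     seg = []
--     for c in row:
--         if c == '#':
--             out.extend(_pack(seg))
--             out.append('#')
--             seg = []
--         else:
--             seg.append(c)
--     out.extend(_pack(seg))
--     return out
-- ===== Notes on version B (the rewrite author's own statement) =====
-- stated objective: alternative
-- what changed: Replaces A's in-place fall-index walk by a segment decomposition: the row is split at '#' walls and each segment is rebuilt as count('O') rocks followed by its remaining cells with 'O' cleared to '.'; B builds a fresh list instead of mutating.
import Mathlib
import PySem

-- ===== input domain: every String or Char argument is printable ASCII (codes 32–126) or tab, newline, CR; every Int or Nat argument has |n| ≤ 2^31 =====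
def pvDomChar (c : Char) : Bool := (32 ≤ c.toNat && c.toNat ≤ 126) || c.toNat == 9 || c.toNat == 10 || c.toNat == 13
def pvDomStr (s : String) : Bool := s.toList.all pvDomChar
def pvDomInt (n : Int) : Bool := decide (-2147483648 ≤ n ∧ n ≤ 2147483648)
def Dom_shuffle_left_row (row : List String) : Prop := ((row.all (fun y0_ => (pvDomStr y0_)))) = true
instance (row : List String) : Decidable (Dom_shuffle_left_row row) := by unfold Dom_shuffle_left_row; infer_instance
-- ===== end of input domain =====

-- B replaces A's in-place fall-index walk by a per-'#'-segment count-then-rebuild; return values agree (A mutates its argument, B builds a new list).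

-- ===== PORT A =====
def shuffle_left_row (row : List String) : List String :=
  ((List.range row.length).foldl
    (fun (st : List String × Nat) i =>
      let r := st.1
      let fi := st.2
      if r.getD i "" = "#" then (r, i + 1)
      else if r.getD i "" = "O" then ((r.set i ".").set fi "O", fi + 1)
      else st)
    (row, 0)).1

-- ===== PORT B =====
def pvPack (seg : List String) : List String :=
  let k := seg.count "O"
  List.replicate k "O" ++ (seg.drop k).map (fun c => if c = "O" then "." else c)

def shuffle_left_row_alt (row : List String) : List String :=
  let st := row.foldl
    (fun (st : List String × List String) c =>
      if c = "#" then (st.1 ++ pvPack st.2 ++ ["#"], ([] : List String))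
      else (st.1, st.2 ++ [c]))
    ([], [])
  st.1 ++ pvPack st.2

-- ===== PRECONDITION & SPEC =====
def Spec_shuffle_left_row (row : List String) (out : List String) : Prop := out = shuffle_left_row_alt row
instance (row : List String) (out : List String) : Decidable (Spec_shuffle_left_row row out) := by unfold Spec_shuffle_left_row; infer_instance

-- ===== CLAIM (what is proved, stated in full; the proofs are below) =====
def Claim_equal_shuffle_left_row : Prop := ∀ (row : List String), Dom_shuffle_left_row row → Spec_shuffle_left_row row (shuffle_left_row row)

-- ===== LEMMAS AND PROOFS =====

def pvStepA (st : List String × Nat) (i : Nat) : List String × Nat :=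
  let r := st.1
  let fi := st.2
  if r.getD i "" = "#" then (r, i + 1)
  else if r.getD i "" = "O" then ((r.set i ".").set fi "O", fi + 1)
  else st

def pvStepB (st : List String × List String) (c : String) : List String × List String :=
  if c = "#" then (st.1 ++ pvPack st.2 ++ ["#"], ([] : List String))
  else (st.1, st.2 ++ [c])

theorem pvPack_length (seg : List String) : (pvPack seg).length = seg.length := by
  simp [pvPack]
  have := List.count_le_length (l := seg) (a := "O")
  omega

theorem pvPack_nil : pvPack [] = [] := by simp [pvPack]

theorem pvPack_snoc_other (seg : List String) (x : String) (hx : x ≠ "O") :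
    pvPack (seg ++ [x]) = pvPack seg ++ [x] := by
  have hk := List.count_le_length (l := seg) (a := "O")
  simp [pvPack, List.count_append, hx,
    List.drop_append_of_le_length hk, List.map_append]

theorem pvPack_snoc_O (seg : List String) :
    ((pvPack seg ++ ["."]).set (seg.count "O") "O") = pvPack (seg ++ ["O"]) := by
  have hk := List.count_le_length (l := seg) (a := "O")
  by_cases h : seg.count "O" = seg.length
  · -- all of seg is rocks: set hits the appended "."
    simp [pvPack, List.count_append, h, List.replicate_succ']
  · have hlt : seg.count "O" < seg.length := lt_of_le_of_ne hk h
    obtain ⟨y, ys, hys⟩ : ∃ y ys, seg.drop (seg.count "O") = y :: ys := by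
      cases hd : seg.drop (seg.count "O") with
      | nil => exfalso; have := congrArg List.length hd; simp at this; omega
      | cons y ys => exact ⟨y, ys, rfl⟩
    have hys' : seg.drop (seg.count "O" + 1) = ys := by
      have : seg.drop (seg.count "O" + 1) = (seg.drop (seg.count "O")).drop 1 := by
        rw [List.drop_drop]
      simp [this, hys]
    have hle : seg.count "O" + 1 ≤ seg.length := hlt
    calc (pvPack seg ++ ["."]).set (seg.count "O") "O"
        = (pvPack seg).set (seg.count "O") "O" ++ ["."] := by
          rw [List.set_append_left]
          rw [pvPack_length]; exact hlt
      _ = pvPack (seg ++ ["O"]) := by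
          simp [pvPack, hys, List.count_append,
            List.drop_append_of_le_length hle, hys',
            List.map_append, List.replicate_succ']

theorem pvMain (rest : List String) : ∀ (out seg : List String),
    ((List.range' (out.length + seg.length) rest.length).foldl pvStepA
        (out ++ pvPack seg ++ rest, out.length + List.count "O" seg)).1
      = (rest.foldl pvStepB (out, seg)).1 ++ pvPack (rest.foldl pvStepB (out, seg)).2 := by
  induction rest with
  | nil => intro out seg; simp
  | cons x t ih =>
    intro out seg
    have hk := List.count_le_length (l := seg) (a := "O")
    have hlen : (out ++ pvPack seg).length = out.length + seg.length := by
      simp [pvPack_length]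
    have hget : (out ++ pvPack seg ++ x :: t).getD (out.length + seg.length) "" = x := by
      rw [List.getD_append_right _ _ _ _ (by omega)]
      simp [hlen]
    simp only [List.length_cons]
    rw [List.range'_succ, List.foldl_cons, List.foldl_cons]
    by_cases hx : x = "#"
    · subst hx
      rw [show pvStepA (out ++ pvPack seg ++ "#" :: t, out.length + List.count "O" seg)
            (out.length + seg.length)
          = ((out ++ pvPack seg ++ ["#"]) ++ pvPack [] ++ t,
             (out ++ pvPack seg ++ ["#"]).length + List.count "O" ([] : List String)) from by
        simp only [pvStepA]
        rw [hget, if_pos rfl]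
        simp only [Prod.mk.injEq]
        refine ⟨by simp [pvPack_nil], by simp [pvPack_length]; omega⟩]
      rw [show pvStepB (out, seg) "#" = (out ++ pvPack seg ++ ["#"], ([] : List String)) from by
        simp [pvStepB]]
      rw [show out.length + seg.length + 1
            = (out ++ pvPack seg ++ ["#"]).length + ([] : List String).length from by
        simp [pvPack_length]; omega]
      exact ih (out ++ pvPack seg ++ ["#"]) []
    · by_cases hO : x = "O"
      · subst hO
        have hset : ((out ++ pvPack seg ++ "O" :: t).set (out.length + seg.length) ".").set
              (out.length + List.count "O" seg) "O"
            = out ++ pvPack (seg ++ ["O"]) ++ t := by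
          have e1 : (out ++ pvPack seg ++ "O" :: t).set (out.length + seg.length) "."
              = out ++ pvPack seg ++ "." :: t := by
            rw [List.set_append, if_neg (by simp [pvPack_length])]
            simp [hlen]
          rw [e1]
          rw [show out ++ pvPack seg ++ "." :: t = out ++ (pvPack seg ++ ["."]) ++ t from by simp]
          rw [List.set_append, if_pos (by simp [pvPack_length]; omega)]
          rw [List.set_append, if_neg (by omega)]
          rw [Nat.add_sub_cancel_left, pvPack_snoc_O]
        rw [show pvStepA (out ++ pvPack seg ++ "O" :: t, out.length + List.count "O" seg)
              (out.length + seg.length)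
            = (out ++ pvPack (seg ++ ["O"]) ++ t, out.length + List.count "O" (seg ++ ["O"])) from by
          simp only [pvStepA]
          rw [hget, if_neg (by decide), if_pos rfl]
          simp only [Prod.mk.injEq]
          refine ⟨hset, by simp [List.count_append]; omega⟩]
        rw [show pvStepB (out, seg) "O" = (out, seg ++ ["O"]) from by simp [pvStepB]]
        rw [show out.length + seg.length + 1 = out.length + (seg ++ ["O"]).length from by
          simp; omega]
        exact ih out (seg ++ ["O"])
      · rw [show pvStepA (out ++ pvPack seg ++ x :: t, out.length + List.count "O" seg)
              (out.length + seg.length)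
            = (out ++ pvPack (seg ++ [x]) ++ t, out.length + List.count "O" (seg ++ [x])) from by
          simp only [pvStepA]
          rw [hget, if_neg hx, if_neg hO]
          simp only [Prod.mk.injEq]
          refine ⟨by rw [pvPack_snoc_other seg x hO]; simp, by simp [List.count_append, hO]⟩]
        rw [show pvStepB (out, seg) x = (out, seg ++ [x]) from by simp [pvStepB, hx]]
        rw [show out.length + seg.length + 1 = out.length + (seg ++ [x]).length from by simp; omega]
        exact ih out (seg ++ [x])

-- ===== VERDICT (by name: the statement is the Claim_ definition above) =====
theorem shuffle_left_row_spec : Claim_equal_shuffle_left_row := by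
  intro row _
  unfold Spec_shuffle_left_row shuffle_left_row shuffle_left_row_alt
  have h := pvMain row [] []
  simp only [List.length_nil, List.count_nil, Nat.add_zero, pvPack_nil,
    List.nil_append, List.append_nil] at h
  rw [List.range_eq_range']
  exact h
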